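-- pv_equiv track=rewrite | github.com/mosahle7/DSA_Python | arrays/gensSameEles.py | sameEles
-- ===== SOURCE A (Python) =====
-- def sameEles(arr):
--     m = max(arr)
--     twos, ones = 0, 0
--
--     for num in arr:
--         d = m - num
--         twos += d // 2
--         ones += d % 2
--
--     # Adjust the twos and ones if possible to minimize generations
--     if twos > ones + 1:
--         adjust = (twos - ones) // 2
--         ones += adjust * 2
--         twos -= adjust
--
--     elif ones > twos + 1:
--         adjust = (ones - twos) // 2
--         twos += adjust
--         ones -= adjust * 2
--
--     # Calculate the minimum number of generations
--     generations = 0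
--
--     while twos > 0 or ones > 0:
--         generations += 1
--         if generations % 2 == 1:  # Odd generation
--             if ones > 0:
--                 ones -= 1
--         else:  # Even generation
--             if twos > 0:
--                 twos -= 1
--
--     return generations
-- ===== SOURCE B (Python) =====
-- def sameEles(arr):
--     m = max(arr)
--     total = m * len(arr) - sum(arr)          # sum of all differences to the max
--     ones = sum(1 for x in arr if (x - m) % 2 != 0)   # differences that are odd
--     twos = (total - ones) // 2
--     if twos > ones + 1:
--         adjust = (twos - ones) // 2
--         ones += adjust * 2
--         twos -= adjust
--     elif ones > twos + 1:
--         adjust = (ones - twos) // 2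
--         twos += adjust
--         ones -= adjust * 2
--     return max(2 * ones - 1 if ones > 0 else 0, 2 * twos)
-- ===== Notes on version B (the rewrite author's own statement) =====
-- stated objective: faster
-- what changed: B replaces A's generation-by-generation simulation while-loop (O(total difference to the max) iterations) with an O(1) closed form max(2*ones-1 if ones>0 else 0, 2*twos) on the adjusted pair, and computes ones/twos by a count and an arithmetic identity instead of A's per-element //2 and %2 accumulation.
-- outside the precondition, e.g. on sameEles([]): A raises ValueError, B raises ValueError
import Mathlib
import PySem

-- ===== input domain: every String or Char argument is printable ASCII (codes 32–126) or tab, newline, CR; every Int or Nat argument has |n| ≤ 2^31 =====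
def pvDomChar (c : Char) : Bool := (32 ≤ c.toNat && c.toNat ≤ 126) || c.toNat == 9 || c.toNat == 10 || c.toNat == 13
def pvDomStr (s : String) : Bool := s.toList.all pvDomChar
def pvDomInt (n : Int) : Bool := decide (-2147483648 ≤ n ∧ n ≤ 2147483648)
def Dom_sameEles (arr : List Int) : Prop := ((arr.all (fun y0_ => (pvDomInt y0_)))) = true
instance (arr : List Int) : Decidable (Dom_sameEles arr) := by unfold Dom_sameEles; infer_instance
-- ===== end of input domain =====

-- B replaces A's O(total-difference) generation-counting while-loop by an O(1) closed form
-- (and the per-element //2,%2 fold by a sum/count): objective = faster (asymptotic).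

-- ===== PORT A =====
-- the while loop of A: odd generations take a one (if any), even generations take a two (if any);
-- fuel is only a totality guard: it strictly exceeds the number of iterations (proved in sameElesLoop_eval)
def sameElesLoop : Nat → Int → Int → Int → Int
  | 0, g, _, _ => g
  | fuel + 1, g, twos, ones =>
    if twos > 0 ∨ ones > 0 then
      if PySem.Int.mod (g + 1) 2 = 1 then
        if ones > 0 then sameElesLoop fuel (g + 1) twos (ones - 1)
        else sameElesLoop fuel (g + 1) twos ones
      else
        if twos > 0 then sameElesLoop fuel (g + 1) (twos - 1) ones
        else sameElesLoop fuel (g + 1) twos ones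
    else g

def sameEles (arr : List Int) : Int :=
  match PySem.List.max? arr (fun y => y) with
  | none => 0   -- unreachable under Pre_: max([]) raises ValueError in Python
  | some m =>
    let p := arr.foldl (fun (acc : Int × Int) num =>
      let d := m - num
      (acc.1 + PySem.Int.floordiv d 2, acc.2 + PySem.Int.mod d 2)) ((0 : Int), (0 : Int))
    let q :=
      if p.1 > p.2 + 1 then
        let adjust := PySem.Int.floordiv (p.1 - p.2) 2
        (p.1 - adjust, p.2 + adjust * 2)
      else if p.2 > p.1 + 1 then
        let adjust := PySem.Int.floordiv (p.2 - p.1) 2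
        (p.1 + adjust, p.2 - adjust * 2)
      else p
    sameElesLoop (2 * (q.1.toNat + q.2.toNat) + 2) 0 q.1 q.2

-- ===== PORT B =====
def sameEles_alt (arr : List Int) : Int :=
  match PySem.List.max? arr (fun y => y) with
  | none => 0   -- unreachable under Pre_
  | some m =>
    let total := m * (arr.length : Int) - arr.foldl (· + ·) 0
    let ones0 := arr.foldl
      (fun (acc : Int) x => acc + (if PySem.Int.mod (x - m) 2 ≠ 0 then 1 else 0)) 0
    let twos0 := PySem.Int.floordiv (total - ones0) 2
    let q :=
      if twos0 > ones0 + 1 then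
        let adjust := PySem.Int.floordiv (twos0 - ones0) 2
        (twos0 - adjust, ones0 + adjust * 2)
      else if ones0 > twos0 + 1 then
        let adjust := PySem.Int.floordiv (ones0 - twos0) 2
        (twos0 + adjust, ones0 - adjust * 2)
      else (twos0, ones0)
    max (if q.2 > 0 then 2 * q.2 - 1 else 0) (2 * q.1)

-- ===== PRECONDITION & SPEC =====
-- Pre_ excludes only the empty list, on which Python's max([]) raises ValueError.
def Pre_sameEles (arr : List Int) : Prop := arr ≠ []
instance (arr : List Int) : Decidable (Pre_sameEles arr) := by unfold Pre_sameEles; infer_instance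
def pvWitness_sameEles : List Int := [0, 1]

def Spec_sameEles (arr : List Int) (out : Int) : Prop := out = sameEles_alt arr
instance (arr : List Int) (out : Int) : Decidable (Spec_sameEles arr out) := by unfold Spec_sameEles; infer_instance

-- ===== CLAIM (what is proved, stated in full; the proofs are below) =====
def Claim_equal_sameEles : Prop := ∀ (arr : List Int), Dom_sameEles arr → Pre_sameEles arr → Spec_sameEles arr (sameEles arr)

-- ===== LEMMAS AND PROOFS =====

-- closed form of A's while loop (for any sufficient fuel)
theorem sameElesLoop_eval (n : Nat) (t o g : Int) (fuel : Nat) (ht : 0 ≤ t) (ho : 0 ≤ o)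
    (hn : (t + o).toNat = n) (hg : PySem.Int.mod g 2 = 0) (hf : 2 * n + 2 ≤ fuel) :
    sameElesLoop fuel g t o = g + max (if o > 0 then 2 * o - 1 else 0) (2 * t) := by
  induction n using Nat.strong_induction_on generalizing t o g fuel with
  | _ n ih =>
  have hm : ∀ a : Int, PySem.Int.mod a 2 = a % 2 :=
    fun a => PySem.Int.mod_eq_emod_of_pos (by norm_num)
  rw [hm] at hg
  have h1 : PySem.Int.mod (g + 1) 2 = 1 := by rw [hm]; omega
  have h2 : PySem.Int.mod (g + 1 + 1) 2 = 0 := by rw [hm]; omega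
  have h2' : ¬ PySem.Int.mod (g + 1 + 1) 2 = 1 := by rw [hm]; omega
  obtain ⟨f, rfl⟩ : ∃ f, fuel = f + 1 + 1 := ⟨fuel - 2, by omega⟩
  by_cases hoz : o > 0
  · rw [sameElesLoop, if_pos (Or.inr hoz), if_pos h1, if_pos hoz]
    by_cases htz : t > 0
    · rw [sameElesLoop, if_pos (Or.inl htz), if_neg h2', if_pos htz]
      rw [ih ((t - 1 + (o - 1)).toNat) (by omega) (t - 1) (o - 1) (g + 1 + 1) f
          (by omega) (by omega) rfl h2 (by omega)]
      split_ifs <;> omega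
    · by_cases ho1 : o - 1 > 0
      · rw [sameElesLoop, if_pos (Or.inr ho1), if_neg h2', if_neg htz]
        rw [ih ((t + (o - 1)).toNat) (by omega) t (o - 1) (g + 1 + 1) f
            (by omega) (by omega) rfl h2 (by omega)]
        split_ifs <;> omega
      · obtain ⟨f', rfl⟩ : ∃ f', f = f' + 1 := ⟨f - 1, by omega⟩
        rw [sameElesLoop, if_neg (by omega)]
        split_ifs <;> omega
  · by_cases htz : t > 0
    · rw [sameElesLoop, if_pos (Or.inl htz), if_pos h1, if_neg hoz]
      rw [sameElesLoop, if_pos (Or.inl htz), if_neg h2', if_pos htz]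
      rw [ih ((t - 1 + o).toNat) (by omega) (t - 1) o (g + 1 + 1) f
          (by omega) (by omega) rfl h2 (by omega)]
      split_ifs <;> omega
    · rw [sameElesLoop, if_neg (by omega)]
      split_ifs <;> omega

theorem foldA_eval (m : Int) (l : List Int) (t o : Int) :
    l.foldl (fun (acc : Int × Int) num =>
        (acc.1 + PySem.Int.floordiv (m - num) 2, acc.2 + PySem.Int.mod (m - num) 2)) (t, o)
      = (t + (l.map (fun x => PySem.Int.floordiv (m - x) 2)).sum,
         o + (l.map (fun x => PySem.Int.mod (m - x) 2)).sum) := by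
  induction l generalizing t o with
  | nil => simp
  | cons x xs ih =>
    simp only [List.foldl_cons, List.map_cons, List.sum_cons]
    rw [ih]
    simp [add_assoc]

theorem foldSum_eval (l : List Int) (c : Int) : l.foldl (· + ·) c = c + l.sum := by
  induction l generalizing c with
  | nil => simp
  | cons x xs ih =>
    simp only [List.foldl_cons, List.sum_cons]
    rw [ih]
    ring

theorem foldOnes_eval (m : Int) (l : List Int) (c : Int) :
    l.foldl (fun (acc : Int) x =>
        acc + (if PySem.Int.mod (x - m) 2 ≠ 0 then 1 else 0)) c
      = c + (l.map (fun x => if PySem.Int.mod (x - m) 2 ≠ 0 then (1 : Int) else 0)).sum := by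
  induction l generalizing c with
  | nil => simp
  | cons x xs ih =>
    simp only [List.foldl_cons, List.map_cons, List.sum_cons]
    rw [ih]
    ring

theorem pymod_eq_emod (a : Int) : PySem.Int.mod a 2 = a % 2 :=
  PySem.Int.mod_eq_emod_of_pos (by norm_num)

theorem pyfd_eq_ediv (a : Int) : PySem.Int.floordiv a 2 = a / 2 :=
  PySem.Int.floordiv_eq_ediv_of_pos (by norm_num)

-- pointwise: A's (m-x) % 2 equals B's odd-difference indicator
theorem mod_indicator (m x : Int) :
    PySem.Int.mod (m - x) 2 = (if PySem.Int.mod (x - m) 2 ≠ 0 then (1 : Int) else 0) := by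
  simp only [pymod_eq_emod]
  split_ifs <;> omega

-- sum of the differences splits into the twos and the ones
theorem sum_split (m : Int) (l : List Int) :
    m * (l.length : Int) - l.sum
      = 2 * (l.map (fun x => PySem.Int.floordiv (m - x) 2)).sum
        + (l.map (fun x => PySem.Int.mod (m - x) 2)).sum := by
  induction l with
  | nil => simp
  | cons x xs ih =>
    have h := PySem.Int.floordiv_mul_add_mod (m - x) 2
    simp only [List.map_cons, List.sum_cons, List.length_cons, List.sum_cons] at *
    push_cast
    nlinarith [h]

theorem fd_nonneg (a : Int) (h : 0 ≤ a) : 0 ≤ PySem.Int.floordiv a 2 := by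
  rw [pyfd_eq_ediv]; omega

theorem mod2_bounds (a : Int) : 0 ≤ PySem.Int.mod a 2 ∧ PySem.Int.mod a 2 ≤ 1 := by
  rw [pymod_eq_emod]; omega

theorem sum_nonneg_of_map {f : Int → Int} (l : List Int) (h : ∀ x ∈ l, 0 ≤ f x) :
    0 ≤ (l.map f).sum := by
  induction l with
  | nil => simp
  | cons x xs ih =>
    simp only [List.map_cons, List.sum_cons]
    have := h x (by simp)
    have := ih (fun y hy => h y (by simp [hy]))
    omega

theorem loop_closed (t o : Int) (ht : 0 ≤ t) (ho : 0 ≤ o) :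
    sameElesLoop (2 * (t.toNat + o.toNat) + 2) 0 t o
      = max (if o > 0 then 2 * o - 1 else 0) (2 * t) := by
  have h0 : PySem.Int.mod 0 2 = 0 := by rw [pymod_eq_emod]; decide
  simpa using sameElesLoop_eval ((t + o).toNat) t o 0 (2 * (t.toNat + o.toNat) + 2)
    ht ho rfl h0 (by omega)

-- A's loop applied to the adjusted pair equals B's closed form on the adjusted pair
theorem adjusted_eval (t o : Int) (ht : 0 ≤ t) (ho : 0 ≤ o) :
    sameElesLoop
      (2 * ((if t > o + 1 then (t - PySem.Int.floordiv (t - o) 2, o + PySem.Int.floordiv (t - o) 2 * 2)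
             else if o > t + 1 then (t + PySem.Int.floordiv (o - t) 2, o - PySem.Int.floordiv (o - t) 2 * 2)
             else (t, o)).1.toNat
            + (if t > o + 1 then (t - PySem.Int.floordiv (t - o) 2, o + PySem.Int.floordiv (t - o) 2 * 2)
               else if o > t + 1 then (t + PySem.Int.floordiv (o - t) 2, o - PySem.Int.floordiv (o - t) 2 * 2)
               else (t, o)).2.toNat) + 2)
      0
      (if t > o + 1 then (t - PySem.Int.floordiv (t - o) 2, o + PySem.Int.floordiv (t - o) 2 * 2)
       else if o > t + 1 then (t + PySem.Int.floordiv (o - t) 2, o - PySem.Int.floordiv (o - t) 2 * 2)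
       else (t, o)).1
      (if t > o + 1 then (t - PySem.Int.floordiv (t - o) 2, o + PySem.Int.floordiv (t - o) 2 * 2)
       else if o > t + 1 then (t + PySem.Int.floordiv (o - t) 2, o - PySem.Int.floordiv (o - t) 2 * 2)
       else (t, o)).2
    = max
        (if (if t > o + 1 then (t - PySem.Int.floordiv (t - o) 2, o + PySem.Int.floordiv (t - o) 2 * 2)
             else if o > t + 1 then (t + PySem.Int.floordiv (o - t) 2, o - PySem.Int.floordiv (o - t) 2 * 2)
             else (t, o)).2 > 0
         then 2 * (if t > o + 1 then (t - PySem.Int.floordiv (t - o) 2, o + PySem.Int.floordiv (t - o) 2 * 2)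
                   else if o > t + 1 then (t + PySem.Int.floordiv (o - t) 2, o - PySem.Int.floordiv (o - t) 2 * 2)
                   else (t, o)).2 - 1
         else 0)
        (2 * (if t > o + 1 then (t - PySem.Int.floordiv (t - o) 2, o + PySem.Int.floordiv (t - o) 2 * 2)
              else if o > t + 1 then (t + PySem.Int.floordiv (o - t) 2, o - PySem.Int.floordiv (o - t) 2 * 2)
              else (t, o)).1) := by
  by_cases c1 : t > o + 1
  · simp only [if_pos c1]
    exact loop_closed _ _ (by rw [pyfd_eq_ediv]; omega) (by rw [pyfd_eq_ediv]; omega)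
  · simp only [if_neg c1]
    by_cases c2 : o > t + 1
    · simp only [if_pos c2]
      exact loop_closed _ _ (by rw [pyfd_eq_ediv]; omega) (by rw [pyfd_eq_ediv]; omega)
    · simp only [if_neg c2]
      exact loop_closed t o ht ho

-- ===== VERDICT (by name: the statement is the Claim_ definition above) =====
theorem sameEles_spec : Claim_equal_sameEles := by
  intro arr _ hpre
  unfold Spec_sameEles
  obtain ⟨h, tl, rfl⟩ : ∃ h tl, arr = h :: tl := by
    cases arr with
    | nil => exact absurd rfl hpre
    | cons h tl => exact ⟨h, tl, rfl⟩
  simp only [sameEles, sameEles_alt, PySem.List.max?_id_cons]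
  set m := tl.foldl max h with hm
  set T := ((h :: tl).map (fun x => PySem.Int.floordiv (m - x) 2)).sum with hT
  set O := ((h :: tl).map (fun x => PySem.Int.mod (m - x) 2)).sum with hO
  rw [foldA_eval, foldSum_eval, foldOnes_eval]
  simp only [zero_add]
  have hones : ((h :: tl).map (fun x => if PySem.Int.mod (x - m) 2 ≠ 0 then (1 : Int) else 0)).sum = O := by
    rw [hO]; exact List.map_congr_left (fun x _ => (mod_indicator m x).symm) ▸ rfl
  have htwos : PySem.Int.floordiv (m * ((h :: tl).length : Int) - (h :: tl).sum - O) 2 = T := by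
    have := sum_split m (h :: tl)
    rw [pyfd_eq_ediv]
    omega
  rw [hones, htwos]
  have hub : ∀ x ∈ h :: tl, x ≤ m := by
    intro x hx
    rcases List.mem_cons.mp hx with rfl | hx
    · exact (PySem.List.le_foldl_max tl x).1
    · exact (PySem.List.le_foldl_max tl h).2 x hx
  have hTn : 0 ≤ T := sum_nonneg_of_map _ (fun x hx => fd_nonneg _ (by have := hub x hx; omega))
  have hOn : 0 ≤ O := sum_nonneg_of_map _ (fun x _ => (mod2_bounds (m - x)).1)
  exact adjusted_eval T O hTn hOn
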